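-- pv_equiv track=rewrite | github.com/FrenchCommando/advent_of_code | 2023/day14.py | rock_count
-- ===== SOURCE A (Python) =====
-- def rock_count(grid, l_cube_rock):
--     counts = [{i: 0 for i in line} for line in l_cube_rock]
--     for d in counts:
--         d[-1] = 0
--     rocks = {(i, j) for i, line in enumerate(grid) for j, r in enumerate(line) if r == "O"}
--     for i, j in rocks:
--         obstacle = max(d for d in counts[j].keys() if d < i)
--         counts[j][obstacle] += 1
--     return counts
-- ===== SOURCE B (Python) =====
-- def rock_count(grid, l_cube_rock):
--     # Group rock rows by column in one grid pass (rows come out increasing),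
--     # then per column walk the sorted obstacle keys and the rock rows together
--     # with a single advancing pointer instead of scanning all keys per rock.
--     col_rows = {}
--     for i, line in enumerate(grid):
--         for j, c in enumerate(line):
--             if c == "O":
--                 col_rows.setdefault(j, []).append(i)
--     result = []
--     for j, line in enumerate(l_cube_rock):
--         d = dict.fromkeys(line, 0)
--         d.setdefault(-1, 0)
--         ks = sorted(d)
--         t = 0
--         for i in col_rows.get(j, ()):
--             while t + 1 < len(ks) and ks[t + 1] < i:
--                 t += 1
--             d[ks[t]] += 1
--         result.append(d)
--     return result
-- ===== Notes on version B (the rewrite author's own statement) =====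
-- stated objective: alternative
-- what changed: Instead of scanning all of a column's obstacle keys with max() for every rock, B groups rock rows per column in one grid pass and then merges each column's sorted key list with its increasing rock rows using a single advancing pointer.
import Mathlib
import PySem

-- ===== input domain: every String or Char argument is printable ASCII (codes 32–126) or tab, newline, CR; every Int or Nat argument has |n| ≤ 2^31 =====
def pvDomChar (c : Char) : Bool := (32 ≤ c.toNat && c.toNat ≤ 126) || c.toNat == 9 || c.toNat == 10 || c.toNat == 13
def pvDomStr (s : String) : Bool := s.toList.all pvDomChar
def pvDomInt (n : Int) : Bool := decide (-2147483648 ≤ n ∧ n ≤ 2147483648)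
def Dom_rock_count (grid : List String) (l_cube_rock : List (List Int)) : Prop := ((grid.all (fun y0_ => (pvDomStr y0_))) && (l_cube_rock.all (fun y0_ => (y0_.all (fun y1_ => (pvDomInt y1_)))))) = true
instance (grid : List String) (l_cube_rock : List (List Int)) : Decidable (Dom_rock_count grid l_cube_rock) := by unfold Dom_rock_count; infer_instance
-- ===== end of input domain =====

-- B groups the rock rows per column in one grid pass and then, per column, walks the
-- sorted obstacle keys and the (increasing) rock rows together with one advancing
-- pointer, instead of re-scanning all of the column's keys for every rock.

-- ===== PORT A =====
def rock_count (grid : List String) (l_cube_rock : List (List Int)) : List (List (Int × Int)) :=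
  -- counts = [{i: 0 for i in line} for line in l_cube_rock]
  let counts0 : List (PySem.Dict Int Int) :=
    l_cube_rock.map (fun line => line.foldl (fun d i => d.insert i 0) PySem.Dict.empty)
  -- for d in counts: d[-1] = 0
  let counts : List (PySem.Dict Int Int) := counts0.map (fun d => d.insert (-1) 0)
  -- rocks = {(i, j) for i, line in enumerate(grid) for j, r in enumerate(line) if r == "O"}
  -- (the pairs are distinct by construction, and the final dict values do not depend on
  --  the set's iteration order, so folding in first-insertion order is exact)
  let rocks : PySem.Set (Int × Int) :=
    PySem.Set.ofList ((PySem.List.enumerate grid).flatMap (fun p =>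
      ((PySem.List.enumerate p.2.toList).filter (fun q => q.2 == 'O')).map (fun q => (p.1, q.1))))
  -- for i, j in rocks: obstacle = max(d for d in counts[j].keys() if d < i); counts[j][obstacle] += 1
  let counts2 := rocks.foldl (fun cs pr =>
    match PySem.List.pyGet? cs pr.2 with
    | none => cs      -- IndexError (rock in a column with no entry): excluded by Pre_
    | some d =>
      match PySem.List.max? (d.keys.filter (fun k => decide (k < pr.1))) (fun x => x) with
      | none => cs    -- ValueError on empty max(): unreachable, -1 is always a key < i
      | some o => cs.set pr.2.toNat (d.modify o 0 (· + 1))) counts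
  counts2.map (fun d => d.items)

-- ===== PORT B =====
-- while t + 1 < len(ks) and ks[t + 1] < i: t += 1   (structural recursion on the
-- remaining distance ks.length - t, so the kernel can evaluate it)
def pvAdvanceGo (ks : List Int) (i : Int) : Nat → Nat → Nat
  | 0, t => t
  | fuel + 1, t =>
    if t + 1 < ks.length ∧ ks.getD (t + 1) 0 < i then pvAdvanceGo ks i fuel (t + 1) else t

def pvAdvance (ks : List Int) (i : Int) (t : Nat) : Nat :=
  pvAdvanceGo ks i (ks.length - t) t

def rock_count_alt (grid : List String) (l_cube_rock : List (List Int)) : List (List (Int × Int)) :=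
  -- col_rows = {}; for i, line in enumerate(grid): for j, c in enumerate(line):
  --   if c == "O": col_rows.setdefault(j, []).append(i)     (= col_rows[j] = col_rows.get(j, []) + [i])
  let col_rows : PySem.Dict Int (List Int) :=
    (PySem.List.enumerate grid).foldl (fun d p =>
      (PySem.List.enumerate p.2.toList).foldl (fun d q =>
        if q.2 == 'O' then d.modify q.1 [] (fun l => l ++ [p.1]) else d) d)
      PySem.Dict.empty
  -- result = []; for j, line in enumerate(l_cube_rock): … ; result.append(d)
  (PySem.List.enumerate l_cube_rock).foldl (fun res p =>
    -- d = dict.fromkeys(line, 0); d.setdefault(-1, 0)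
    let d0 : PySem.Dict Int Int := p.2.foldl (fun d k => d.insert k 0) PySem.Dict.empty
    let d1 := d0.setdefault (-1) 0
    -- ks = sorted(d)
    let ks := PySem.List.sorted d1.keys (fun x => x)
    -- t = 0; for i in col_rows.get(j, ()): while …: t += 1 ; d[ks[t]] += 1
    let st := (col_rows.getD p.1 []).foldl
        (fun (s : Nat × PySem.Dict Int Int) i =>
          let t := pvAdvance ks i s.1
          (t, s.2.modify (ks.getD t 0) 0 (· + 1)))
        (0, d1)
    res ++ [st.2.items]) []

-- ===== PRECONDITION & SPEC =====
-- Pre_ excludes exactly the inputs where A raises IndexError: a rock 'O' in a grid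
-- column j with j ≥ len(l_cube_rock) (counts[j] is out of range).
def Pre_rock_count (grid : List String) (l_cube_rock : List (List Int)) : Prop :=
  ∀ s ∈ grid, 'O' ∉ s.toList.drop l_cube_rock.length
instance (grid : List String) (l_cube_rock : List (List Int)) : Decidable (Pre_rock_count grid l_cube_rock) := by unfold Pre_rock_count; infer_instance

def pvWitness_rock_count : List String × List (List Int) := (["O#", ".O"], [[0], [1, 0]])

def Spec_rock_count (grid : List String) (l_cube_rock : List (List Int)) (out : List (List (Int × Int))) : Prop := out = rock_count_alt grid l_cube_rock
instance (grid : List String) (l_cube_rock : List (List Int)) (out : List (List (Int × Int))) : Decidable (Spec_rock_count grid l_cube_rock out) := by unfold Spec_rock_count; infer_instance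

-- ===== CLAIM (what is proved, stated in full; the proofs are below) =====
def Claim_equal_rock_count : Prop := ∀ (grid : List String) (l_cube_rock : List (List Int)), Dom_rock_count grid l_cube_rock → Pre_rock_count grid l_cube_rock → Spec_rock_count grid l_cube_rock (rock_count grid l_cube_rock)


-- ===== LEMMAS AND PROOFS =====

-- The list the rock-set comprehension of A is built from.
def pvRocks (grid : List String) : List (Int × Int) :=
  (PySem.List.enumerate grid).flatMap (fun p =>
    ((PySem.List.enumerate p.2.toList).filter (fun q => q.2 == 'O')).map (fun q => (p.1, q.1)))

-- A's per-rock update of one column's dict.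
def pvStepD (d : PySem.Dict Int Int) (i : Int) : PySem.Dict Int Int :=
  match PySem.List.max? (d.keys.filter (fun k => decide (k < i))) (fun x => x) with
  | none => d
  | some o => d.modify o 0 (· + 1)

-- A's per-rock update of the list of column dicts.
def pvStepA (cs : List (PySem.Dict Int Int)) (pr : Int × Int) : List (PySem.Dict Int Int) :=
  match PySem.List.pyGet? cs pr.2 with
  | none => cs
  | some d =>
    match PySem.List.max? (d.keys.filter (fun k => decide (k < pr.1))) (fun x => x) with
    | none => cs
    | some o => cs.set pr.2.toNat (d.modify o 0 (· + 1))

-- The rows of the rocks lying in column c, in row order.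
def pvRowsOf (R : List (Int × Int)) (c : Int) : List Int :=
  (R.filter (fun pr => pr.2 == c)).map (fun pr => pr.1)

-- B's per-rock update of (pointer, dict), and B's named building blocks.
def pvStepB (ks : List Int) (s : Nat × PySem.Dict Int Int) (i : Int) : Nat × PySem.Dict Int Int :=
  let t := pvAdvance ks i s.1
  (t, s.2.modify (ks.getD t 0) 0 (· + 1))

def pvBase (line : List Int) : PySem.Dict Int Int :=
  line.foldl (fun d k => d.insert k 0) PySem.Dict.empty

def pvColDict (line : List Int) : PySem.Dict Int Int := (pvBase line).setdefault (-1) 0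

def pvColRows (grid : List String) : PySem.Dict Int (List Int) :=
  (PySem.List.enumerate grid).foldl (fun d p =>
    (PySem.List.enumerate p.2.toList).foldl (fun d q =>
      if q.2 == 'O' then d.modify q.1 [] (fun l => l ++ [p.1]) else d) d)
    PySem.Dict.empty

-- The two ports, written with the named building blocks (definitional repackaging).
theorem rock_count_char (grid : List String) (l : List (List Int)) :
    rock_count grid l
      = ((PySem.Set.ofList (pvRocks grid)).foldl pvStepA
          ((l.map pvBase).map (fun d => d.insert (-1) 0))).map (fun d => d.items) := rfl

theorem rock_count_alt_char (grid : List String) (l : List (List Int)) :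
    rock_count_alt grid l
      = (PySem.List.enumerate l).foldl (fun res p =>
          res ++ [(((pvColRows grid).getD p.1 []).foldl
            (pvStepB (PySem.List.sorted (pvColDict p.2).keys (fun x => x)))
            (0, pvColDict p.2)).2.items]) [] := rfl

-- ---- facts about the rock list ----

theorem pvEnum_pairwise {α : Type} (xs : List α) (s : Int) :
    (PySem.List.enumerate xs s).Pairwise (fun a b => a.1 < b.1) := by
  rw [List.pairwise_iff_getElem]
  intro i j hi hj hij
  rw [PySem.List.getElem_enumerate, PySem.List.getElem_enumerate]
  simp only []
  have : (i : Int) < (j : Int) := by exact_mod_cast hij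
  omega

theorem pvEnum_mem {α : Type} {xs : List α} {q : Int × α} (h : q ∈ PySem.List.enumerate xs 0) :
    0 ≤ q.1 ∧ ∃ hc : q.1.toNat < xs.length, xs[q.1.toNat] = q.2 := by
  rw [List.mem_iff_getElem] at h
  obtain ⟨k, hk, hq⟩ := h
  rw [PySem.List.getElem_enumerate] at hq
  have hk' : k < xs.length := by
    have := PySem.List.length_enumerate xs 0
    omega
  subst hq
  refine ⟨by simp, by simp [hk'], by simp⟩

theorem pvRocks_pairwise (grid : List String) :
    (pvRocks grid).Pairwise (fun a b => a.1 < b.1 ∨ (a.1 = b.1 ∧ a.2 < b.2)) := by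
  unfold pvRocks
  rw [List.pairwise_flatMap]
  constructor
  · intro p _
    rw [List.pairwise_map]
    exact ((pvEnum_pairwise p.2.toList 0).filter _).imp (fun h => Or.inr ⟨rfl, h⟩)
  · refine (pvEnum_pairwise grid 0).imp ?_
    intro a b hab x hx y hy
    rw [List.mem_map] at hx hy
    obtain ⟨qa, _, rfl⟩ := hx
    obtain ⟨qb, _, rfl⟩ := hy
    exact Or.inl hab

theorem pvRocks_nodup (grid : List String) : (pvRocks grid).Nodup := by
  refine (pvRocks_pairwise grid).imp ?_
  intro a b h heq
  subst heq
  rcases h with h | ⟨_, h⟩ <;> omega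

theorem pvRocks_mem {grid : List String} {pr : Int × Int} (h : pr ∈ pvRocks grid) :
    0 ≤ pr.1 ∧ 0 ≤ pr.2 ∧
      ∃ s ∈ grid, ∃ hc : pr.2.toNat < s.toList.length, s.toList[pr.2.toNat] = 'O' := by
  unfold pvRocks at h
  rw [List.mem_flatMap] at h
  obtain ⟨p, hp, hmem⟩ := h
  rw [List.mem_map] at hmem
  obtain ⟨q, hq, rfl⟩ := hmem
  rw [List.mem_filter] at hq
  obtain ⟨hq, hO⟩ := hq
  obtain ⟨hq1, hc, hval⟩ := pvEnum_mem hq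
  obtain ⟨hp1, hcp, hvalp⟩ := pvEnum_mem hp
  refine ⟨hp1, hq1, p.2, ?_, hc, ?_⟩
  · exact hvalp ▸ List.getElem_mem hcp
  · rw [hval]; exact eq_of_beq hO

-- ---- A's fold, decomposed per column ----

theorem pvStepA_eq (cs : List (PySem.Dict Int Int)) (pr : Int × Int)
    (h2 : 0 ≤ pr.2) (hlt : pr.2.toNat < cs.length) :
    pvStepA cs pr = cs.set pr.2.toNat (pvStepD (cs.getD pr.2.toNat PySem.Dict.empty) pr.1) := by
  have hcast : pr.2 = (pr.2.toNat : Int) := by omega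
  have hget : PySem.List.pyGet? cs pr.2 = some cs[pr.2.toNat] := by
    conv_lhs => rw [hcast]
    rw [PySem.List.pyGet?_natCast, List.getElem?_eq_getElem hlt]
  have hgetD : cs.getD pr.2.toNat PySem.Dict.empty = cs[pr.2.toNat] := List.getD_eq_getElem cs _ hlt
  simp only [pvStepA, hget, hgetD, pvStepD]
  rcases hmax : PySem.List.max? (List.filter (fun k => decide (k < pr.1)) cs[pr.2.toNat].keys) (fun x => x) with _ | o
  · simp [List.set_getElem_self]
  · rfl

theorem pvStepA_length (cs : List (PySem.Dict Int Int)) (pr : Int × Int) :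
    (pvStepA cs pr).length = cs.length := by
  rw [pvStepA]
  rcases PySem.List.pyGet? cs pr.2 with _ | d
  · rfl
  · simp only []
    rcases PySem.List.max? (List.filter (fun k => decide (k < pr.1)) d.keys) (fun x => x) with _ | o
    · rfl
    · exact List.length_set

theorem pvFoldA_length (R : List (Int × Int)) (cs : List (PySem.Dict Int Int)) :
    (R.foldl pvStepA cs).length = cs.length := by
  induction R generalizing cs with
  | nil => rfl
  | cons pr R ih => rw [List.foldl_cons, ih, pvStepA_length]

theorem pvFoldA_getD (R : List (Int × Int)) (cs : List (PySem.Dict Int Int))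
    (h : ∀ pr ∈ R, 0 ≤ pr.2 ∧ pr.2.toNat < cs.length) (n : Nat) (hn : n < cs.length) :
    (R.foldl pvStepA cs).getD n PySem.Dict.empty
      = (pvRowsOf R (n : Int)).foldl pvStepD (cs.getD n PySem.Dict.empty) := by
  induction R generalizing cs with
  | nil => rfl
  | cons pr R ih =>
    obtain ⟨h2, hlt⟩ := h pr (List.mem_cons_self ..)
    rw [List.foldl_cons, pvStepA_eq cs pr h2 hlt]
    have hlen : (cs.set pr.2.toNat (pvStepD (cs.getD pr.2.toNat PySem.Dict.empty) pr.1)).length = cs.length :=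
      List.length_set
    have hR : ∀ q ∈ R, 0 ≤ q.2 ∧ q.2.toNat < (cs.set pr.2.toNat (pvStepD (cs.getD pr.2.toNat PySem.Dict.empty) pr.1)).length := by
      intro q hq; rw [hlen]; exact h q (List.mem_cons_of_mem _ hq)
    rw [ih _ hR (by rw [hlen]; exact hn)]
    by_cases hFeq : pr.2 = (n : Int)
    · have hbeq : (pr.2 == (n : Int)) = true := by simp [hFeq]
      have hnn : pr.2.toNat = n := by omega
      simp only [pvRowsOf, List.filter_cons, hbeq, if_true, List.map_cons, List.foldl_cons]
      congr 1
      rw [hnn, List.getD_eq_getElem _ _ (by rw [List.length_set]; exact hn),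
          List.getElem_set, if_pos rfl, List.getD_eq_getElem _ _ hn]
    · have hbeq : (pr.2 == (n : Int)) = false := by simp [hFeq]
      simp only [pvRowsOf, List.filter_cons, hbeq]
      congr 1
      rw [List.getD_eq_getElem _ _ (by rw [List.length_set]; exact hn),
          List.getD_eq_getElem _ _ hn, List.getElem_set, if_neg (by omega)]

-- ---- B's grouping dict gives exactly the per-column rows ----

theorem pvColRows_getD (grid : List String) (c : Int) :
    (pvColRows grid).getD c [] = pvRowsOf (pvRocks grid) c := by
  have hinner : ∀ (p : Int × String) (d : PySem.Dict Int (List Int)),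
      (PySem.List.enumerate p.2.toList).foldl (fun d q =>
        if q.2 == 'O' then d.modify q.1 [] (fun l => l ++ [p.1]) else d) d
      = (((PySem.List.enumerate p.2.toList).filter (fun q => q.2 == 'O')).map
          (fun q => (q.1, p.1))).foldl (fun d pr => d.modify pr.1 [] (fun l => l ++ [pr.2])) d := by
    intro p d
    rw [List.foldl_map]
    rw [← List.foldl_filter]
  unfold pvColRows
  simp only [hinner]
  rw [← List.foldl_flatMap]
  rw [PySem.Dict.getD_foldl_modify_append]
  have hswap : (PySem.List.enumerate grid).flatMap (fun p =>
      ((PySem.List.enumerate p.2.toList).filter (fun q => q.2 == 'O')).map (fun q => (q.1, p.1)))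
      = (pvRocks grid).map Prod.swap := by
    rw [pvRocks, List.map_flatMap]
    congr 1
    funext p
    rw [List.map_map]
    rfl
  rw [hswap, List.filter_map, List.map_map]
  rw [pvRowsOf]
  congr 1

-- ---- the per-column start dict of A equals B's ----

theorem pvBase_items_zero (line : List Int) : ∀ p ∈ (pvBase line).items, p.2 = 0 := by
  have : ∀ (d : PySem.Dict Int Int), (∀ p ∈ d.items, p.2 = 0) →
      ∀ p ∈ (line.foldl (fun d k => d.insert k 0) d).items, p.2 = 0 := by
    induction line with
    | nil => intro d hd; exact hd
    | cons k line ih =>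
      intro d hd
      refine ih _ ?_
      intro p hp
      rw [PySem.Dict.mem_items_insert] at hp
      rcases hp with rfl | ⟨hp, _⟩
      · rfl
      · exact hd p hp
  exact this PySem.Dict.empty (by intro p hp; simp [PySem.Dict.empty] at hp)

theorem pvBase_nodup_keys (line : List Int) : (pvBase line).keys.Nodup :=
  PySem.Dict.nodup_keys_foldl_insert line (fun _ _ => 0) PySem.Dict.empty
    PySem.Dict.nodup_keys_empty

theorem pvBase_insert_eq_setdefault (line : List Int) :
    (pvBase line).insert (-1) 0 = pvColDict line := by
  rw [pvColDict]
  by_cases hc : (pvBase line).contains (-1)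
  · rw [PySem.Dict.setdefault_of_contains _ _ hc]
    apply PySem.Dict.ext
    rw [PySem.Dict.items_insert_of_contains _ _ hc]
    have : ∀ p ∈ (pvBase line).items, (if (p.1 == (-1 : Int)) = true then ((-1 : Int), (0 : Int)) else p) = p := by
      intro p hp
      split_ifs with h
      · have h1 : p.1 = -1 := by simpa using h
        have h2 : p.2 = 0 := pvBase_items_zero line p hp
        rw [Prod.ext_iff]; exact ⟨h1.symm, h2.symm⟩
      · rfl
    rw [List.map_congr_left this]; simp
  · rw [PySem.Dict.setdefault_of_not_contains _ _ (by simpa using hc)]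

theorem pvCol_nodup_keys (line : List Int) : (pvColDict line).keys.Nodup := by
  rw [← pvBase_insert_eq_setdefault]
  exact PySem.Dict.nodup_keys_insert _ _ _ (pvBase_nodup_keys line)

theorem pvCol_mem_keys (line : List Int) : (-1 : Int) ∈ (pvColDict line).keys := by
  rw [← pvBase_insert_eq_setdefault, ← PySem.Dict.contains_iff_mem_keys]
  exact PySem.Dict.contains_insert_self _ _ _

-- ---- the pointer walk computes A's max-scan ----

theorem pvAdvanceGo_spec (ks : List Int) (i : Int) :
    ∀ fuel t, ks.length - t ≤ fuel → t < ks.length → ks.getD t 0 < i →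
      t ≤ pvAdvanceGo ks i fuel t ∧ pvAdvanceGo ks i fuel t < ks.length ∧
      ks.getD (pvAdvanceGo ks i fuel t) 0 < i ∧
      (pvAdvanceGo ks i fuel t + 1 < ks.length → i ≤ ks.getD (pvAdvanceGo ks i fuel t + 1) 0) := by
  intro fuel
  induction fuel with
  | zero => intro t hf ht _; omega
  | succ fuel ih =>
    intro t hf ht hlt
    rw [pvAdvanceGo]
    split_ifs with hcond
    · obtain ⟨h1, h2⟩ := hcond
      obtain ⟨a, b, c, d⟩ := ih (t + 1) (by omega) h1 h2
      exact ⟨by omega, b, c, d⟩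
    · push Not at hcond
      refine ⟨le_refl t, ht, hlt, ?_⟩
      intro hl
      exact hcond hl

theorem pvAdvance_spec (ks : List Int) (i : Int) (t : Nat) (ht : t < ks.length)
    (hlt : ks.getD t 0 < i) :
    t ≤ pvAdvance ks i t ∧ pvAdvance ks i t < ks.length ∧
    ks.getD (pvAdvance ks i t) 0 < i ∧
    (pvAdvance ks i t + 1 < ks.length → i ≤ ks.getD (pvAdvance ks i t + 1) 0) :=
  pvAdvanceGo_spec ks i (ks.length - t) t (le_refl _) ht hlt

theorem pvSorted_getD_mono (ks : List Int) (hst : ks.Pairwise (· < ·)) {u v : Nat}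
    (huv : u ≤ v) (hv : v < ks.length) : ks.getD u 0 ≤ ks.getD v 0 := by
  rcases Nat.eq_or_lt_of_le huv with rfl | hlt
  · exact le_refl _
  · rw [List.getD_eq_getElem _ _ (by omega), List.getD_eq_getElem _ _ hv]
    exact le_of_lt (List.pairwise_iff_getElem.mp hst u v (by omega) hv hlt)

theorem pvMax_eq (K ks : List Int) (i : Int) (hperm : ks.Perm K) (hst : ks.Pairwise (· < ·))
    (t' : Nat) (ht' : t' < ks.length) (hlt : ks.getD t' 0 < i)
    (hnext : t' + 1 < ks.length → i ≤ ks.getD (t' + 1) 0) :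
    PySem.List.max? (K.filter (fun k => decide (k < i))) (fun x => x) = some (ks.getD t' 0) := by
  have hkt : ks.getD t' 0 = ks[t'] := List.getD_eq_getElem _ _ ht'
  have hmemK : ks.getD t' 0 ∈ K := hperm.mem_iff.mp (hkt ▸ List.getElem_mem ht')
  have hmemF : ks.getD t' 0 ∈ K.filter (fun k => decide (k < i)) := by
    rw [List.mem_filter]
    exact ⟨hmemK, by simpa using hlt⟩
  rcases hm : PySem.List.max? (K.filter (fun k => decide (k < i))) (fun x => x) with _ | m
  · rw [PySem.List.max?_eq_none_iff] at hm
    rw [hm] at hmemF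
    simp at hmemF
  · have hmmem := PySem.List.max?_mem hm
    rw [List.mem_filter] at hmmem
    obtain ⟨hmK, hmi⟩ := hmmem
    have hmi : m < i := by simpa using hmi
    have hmks : m ∈ ks := hperm.symm.mem_iff.mp hmK
    obtain ⟨u, hu, hmu⟩ := List.mem_iff_getElem.mp hmks
    have hum : u ≤ t' := by
      by_contra hgt
      push Not at hgt
      have h1 : t' + 1 < ks.length := by omega
      have h2 : i ≤ ks.getD (t' + 1) 0 := hnext h1
      have h3 : ks.getD (t' + 1) 0 ≤ ks.getD u 0 := pvSorted_getD_mono ks hst (by omega) hu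
      have h4 : ks.getD u 0 = m := by rw [List.getD_eq_getElem _ _ hu, hmu]
      omega
    have hle1 : m ≤ ks.getD t' 0 := by
      have := pvSorted_getD_mono ks hst hum ht'
      rw [List.getD_eq_getElem _ _ hu, hmu] at this
      exact this
    have hle2 : ks.getD t' 0 ≤ m := PySem.List.max?_isMax hm _ hmemF
    have : m = ks.getD t' 0 := le_antisymm hle1 hle2
    rw [this]

theorem pvFoldB (ks K : List Int) (hperm : ks.Perm K) (hst : ks.Pairwise (· < ·)) :
    ∀ (rows : List Int) (d : PySem.Dict Int Int) (t : Nat), d.keys = K → t < ks.length →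
      (∀ i ∈ rows, ks.getD t 0 < i) → rows.Pairwise (· ≤ ·) →
      (rows.foldl (pvStepB ks) (t, d)).2 = rows.foldl pvStepD d := by
  intro rows
  induction rows with
  | nil => intro d t _ _ _ _; rfl
  | cons i rows ih =>
    intro d t hkeys ht hbelow hpw
    have hlt : ks.getD t 0 < i := hbelow i (List.mem_cons_self ..)
    obtain ⟨hle, ht', hlt', hnext⟩ := pvAdvance_spec ks i t ht hlt
    rw [List.foldl_cons, List.foldl_cons]
    have hmax : PySem.List.max? (d.keys.filter (fun k => decide (k < i))) (fun x => x)
        = some (ks.getD (pvAdvance ks i t) 0) := by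
      rw [hkeys]
      exact pvMax_eq K ks i hperm hst _ ht' hlt' hnext
    have hstepD : pvStepD d i = d.modify (ks.getD (pvAdvance ks i t) 0) 0 (· + 1) := by
      rw [pvStepD, hmax]
    have hstepB : pvStepB ks (t, d) i
        = (pvAdvance ks i t, d.modify (ks.getD (pvAdvance ks i t) 0) 0 (· + 1)) := rfl
    rw [hstepB, ← hstepD]
    have hcont : d.contains (ks.getD (pvAdvance ks i t) 0) = true := by
      rw [PySem.Dict.contains_iff_mem_keys, hkeys]
      refine hperm.mem_iff.mp ?_
      rw [List.getD_eq_getElem _ _ ht']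
      exact List.getElem_mem ht'
    have hkeys' : (pvStepD d i).keys = K := by
      rw [hstepD, PySem.Dict.keys_modify, PySem.Dict.keys_insert_of_contains _ _ hcont, hkeys]
    refine ih (pvStepD d i) (pvAdvance ks i t) hkeys' ht' ?_ (hpw.sublist (List.sublist_cons_self ..))
    intro i' hi'
    have h1 : i ≤ i' := (List.pairwise_cons.mp hpw).1 i' hi'
    omega

-- ===== VERDICT (by name: the statement is the Claim_ definition above) =====
theorem rock_count_spec : Claim_equal_rock_count := by
  intro grid l _dom hpre
  unfold Spec_rock_count
  rw [rock_count_char, rock_count_alt_char]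
  rw [PySem.Set.ofList_eq_self_of_nodup _ (pvRocks_nodup grid)]
  rw [PySem.List.foldl_append_singleton_eq_map, List.nil_append]
  set cs : List (PySem.Dict Int Int) := (l.map pvBase).map (fun d => d.insert (-1) 0) with hcs
  have hcslen : cs.length = l.length := by rw [hcs]; simp
  -- every rock's column is in range (else its 'O' would be in the dropped suffix)
  have hbound : ∀ pr ∈ pvRocks grid, 0 ≤ pr.2 ∧ pr.2.toNat < cs.length := by
    intro pr hpr
    obtain ⟨_, h2, s, hs, hc, hval⟩ := pvRocks_mem hpr
    refine ⟨h2, ?_⟩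
    rw [hcslen]
    by_contra hge
    push Not at hge
    have hidx : pr.2.toNat - l.length < (s.toList.drop l.length).length := by
      rw [List.length_drop]; omega
    have : 'O' ∈ s.toList.drop l.length := by
      rw [List.mem_iff_getElem]
      refine ⟨pr.2.toNat - l.length, hidx, ?_⟩
      rw [List.getElem_drop]
      have : l.length + (pr.2.toNat - l.length) = pr.2.toNat := by omega
      simp_rw [this]
      exact hval
    exact hpre s hs this
  apply List.ext_getElem
  · rw [List.length_map, pvFoldA_length, hcslen, List.length_map,
        PySem.List.length_enumerate]
  · intro n h1 h2
    rw [List.length_map, pvFoldA_length, hcslen] at h1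
    rw [List.getElem_map, List.getElem_map, PySem.List.getElem_enumerate]
    simp only [zero_add]
    -- the column's start dict
    have hcsn : cs.getD n PySem.Dict.empty = pvColDict l[n] := by
      rw [hcs, List.getD_eq_getElem _ _ (by simpa using h1), List.getElem_map, List.getElem_map]
      exact pvBase_insert_eq_setdefault _
    -- the A side
    have hA : ((pvRocks grid).foldl pvStepA cs)[n]'(by rw [pvFoldA_length, hcslen]; exact h1)
        = (pvRowsOf (pvRocks grid) (n : Int)).foldl pvStepD (pvColDict l[n]) := by
      rw [← List.getD_eq_getElem _ PySem.Dict.empty,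
          pvFoldA_getD _ _ hbound n (by rw [hcslen]; exact h1), hcsn]
    rw [hA]
    -- the B side
    rw [pvColRows_getD]
    set K := (pvColDict l[n]).keys with hK
    set ks := PySem.List.sorted K (fun x => x) with hks
    have hperm : ks.Perm K := PySem.List.sorted_perm K (fun x => x) false
    have hnodK : K.Nodup := pvCol_nodup_keys _
    have hst : ks.Pairwise (· < ·) := by
      have hle : ks.Pairwise (· ≤ ·) := PySem.List.sorted_pairwise K (fun x => x)
      have hne : ks.Pairwise (· ≠ ·) := (hperm.nodup_iff.mpr hnodK)
      exact (hle.and hne).imp (fun h => lt_of_le_of_ne h.1 h.2)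
    have hmem1 : (-1 : Int) ∈ ks := hperm.mem_iff.mpr (pvCol_mem_keys _)
    have hkslen : 0 < ks.length := List.length_pos_iff.mpr (List.ne_nil_of_mem hmem1)
    have hrows_nonneg : ∀ i ∈ pvRowsOf (pvRocks grid) (n : Int), 0 ≤ i := by
      intro i hi
      rw [pvRowsOf, List.mem_map] at hi
      obtain ⟨pr, hpr, rfl⟩ := hi
      exact (pvRocks_mem (List.mem_of_mem_filter hpr)).1
    have hbelow : ∀ i ∈ pvRowsOf (pvRocks grid) (n : Int), ks.getD 0 0 < i := by
      intro i hi
      obtain ⟨u, hu, hval⟩ := List.mem_iff_getElem.mp hmem1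
      have h01 : ks.getD 0 0 ≤ ks.getD u 0 := pvSorted_getD_mono ks hst (Nat.zero_le u) hu
      have h02 : ks.getD u 0 = -1 := by rw [List.getD_eq_getElem _ _ hu, hval]
      have h03 := hrows_nonneg i hi
      omega
    have hpw : (pvRowsOf (pvRocks grid) (n : Int)).Pairwise (· ≤ ·) := by
      rw [pvRowsOf, List.pairwise_map]
      refine ((pvRocks_pairwise grid).filter _).imp ?_
      intro a b h
      rcases h with h | ⟨h, _⟩ <;> omega
    rw [pvFoldB ks K hperm hst (pvRowsOf (pvRocks grid) (n : Int)) (pvColDict l[n]) 0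
        hK.symm hkslen hbelow hpw]
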